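-- pv_equiv track=rewrite | github.com/kodsnack/advent_of_code_2020 | Dyr-El-python/day10.py | noWays
-- ===== SOURCE A (Python) =====
-- def noWays(l, idx):
--    if idx > len(l) - 2:
--       return 1
--    if l[idx+1] - l[idx-1] > 3:
--       v = noWays(l, idx+1)
--       return v
--    l2 = l[:idx] + l[idx+1:]
--    v = noWays(l, idx+1) + noWays(l2, idx)
--    return v
-- ===== SOURCE B (Python) =====
-- def noWays(l, idx):
--     if idx > len(l) - 2:
--         return 1
--     xs = [l[idx - 1]] + l[idx:]
--     ys = xs[-1:]          # kept-element suffix processed so far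
--     gs = [1]              # gs[k] = number of arrangements of ys[k:] with previous element ys[k]
--     for xi in reversed(xs[:-1]):
--         total = gs[0]
--         for x, g in zip(ys[1:], gs[1:]):
--             if x - xi > 3:
--                 break
--             total += g
--         ys.insert(0, xi)
--         gs.insert(0, total)
--     return gs[0]
-- ===== Notes on version B (the rewrite author's own statement) =====
-- stated objective: faster
-- what changed: Replaces A's exponential branching recursion (keep/delete the element at idx, rebuilding the list on every delete) with a single right-to-left dynamic-programming pass that stores, for each position, the number of valid arrangements of the suffix, summing the reachable successors (inner scan stops at the first gap > 3); intended as faster — a timing run read large speedups (hundreds to thousands x) at the largest sizes where A finished at all, but A times out beyond that so a timing run records the speed label as unconfirmed.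
-- outside the precondition, e.g. on noWays([10, 0, 5], -1): A returns 4, B returns 1
import Mathlib
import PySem

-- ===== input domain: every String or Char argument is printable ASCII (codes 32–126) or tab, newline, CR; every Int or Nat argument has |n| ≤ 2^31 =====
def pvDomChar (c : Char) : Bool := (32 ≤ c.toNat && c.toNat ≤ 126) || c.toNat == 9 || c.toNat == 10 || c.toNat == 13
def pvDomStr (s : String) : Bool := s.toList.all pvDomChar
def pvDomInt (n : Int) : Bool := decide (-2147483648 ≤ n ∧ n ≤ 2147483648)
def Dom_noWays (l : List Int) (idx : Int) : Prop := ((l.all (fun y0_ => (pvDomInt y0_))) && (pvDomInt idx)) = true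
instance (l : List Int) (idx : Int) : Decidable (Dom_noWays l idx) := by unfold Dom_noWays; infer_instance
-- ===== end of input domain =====

-- B replaces A's exponential keep/delete recursion by one right-to-left DP pass; intended as
-- faster (a timing run read large speedups where A finished, but A's timeouts on larger
-- inputs left the speed label unconfirmed).

-- ===== PORT A =====
-- A's double recursion is not structurally decreasing for negative idx (where the Python
-- diverges or raises); the fuel only makes the same computation total — on Pre_ the
-- initial fuel l.length + 2 is proved sufficient (lemma noWaysFuel_eq below).
def noWaysFuel : Nat → List Int → Int → Int
  | 0, _, _ => 0
  | fuel+1, l, idx =>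
    if (l.length : Int) - 2 < idx then 1
    else if PySem.List.pyGetD l (idx+1) 0 - PySem.List.pyGetD l (idx-1) 0 > 3 then
      noWaysFuel fuel l (idx+1)
    else
      noWaysFuel fuel l (idx+1) +
        noWaysFuel fuel (PySem.List.slice l none (some idx) ++ PySem.List.slice l (some (idx+1)) none) idx

def noWays (l : List Int) (idx : Int) : Int := noWaysFuel (l.length + 2) l idx

-- ===== PORT B =====
-- inner 'for x, g in zip(ys[1:], gs[1:]): if x - xi > 3: break; total += g'
def bInner (xi : Int) : List Int → List Int → Int
  | x :: xr, g :: gr => if x - xi > 3 then 0 else g + bInner xi xr gr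
  | _, _ => 0

-- outer 'for xi in reversed(xs[:-1])' loop; state = (ys, gs), both grown by insert(0, ·)
def bLoop : List Int → List Int → List Int → List Int
  | [], _, gs => gs
  | xi :: rp, ys, gs => bLoop rp (xi :: ys) ((gs.headD 0 + bInner xi ys.tail gs.tail) :: gs)

def noWays_alt (l : List Int) (idx : Int) : Int :=
  if (l.length : Int) - 2 < idx then 1
  else
    let xs := PySem.List.pyGetD l (idx-1) 0 :: PySem.List.slice l (some idx) none
    (bLoop ((xs.take (xs.length - 1)).reverse) (xs.drop (xs.length - 1)) [1]).headD 0

-- ===== PRECONDITION & SPEC =====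
-- Pre_ excludes negative idx reaching the recursive case (idx ≤ len(l)-2), where Python's
-- negative-index wraparound and the negative slice l[idx+1:] (which re-includes the whole
-- front of the list) make A raise IndexError, diverge, or return an accidental value.
def Pre_noWays (l : List Int) (idx : Int) : Prop := 0 ≤ idx ∨ (l.length : Int) - 2 < idx
instance (l : List Int) (idx : Int) : Decidable (Pre_noWays l idx) := by unfold Pre_noWays; infer_instance
def pvWitness_noWays : List Int × Int := ([1, 4, 5, 6, 9], 1)

def Spec_noWays (l : List Int) (idx : Int) (out : Int) : Prop := out = noWays_alt l idx
instance (l : List Int) (idx : Int) (out : Int) : Decidable (Spec_noWays l idx out) := by unfold Spec_noWays; infer_instance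

-- ===== CLAIM (what is proved, stated in full; the proofs are below) =====
def Claim_equal_noWays : Prop := ∀ (l : List Int) (idx : Int), Dom_noWays l idx → Pre_noWays l idx → Spec_noWays l idx (noWays l idx)

-- ===== LEMMAS AND PROOFS =====

-- common specification: fSpec p xs = number of valid arrangements of xs, previous kept element p
def fSpec : Int → List Int → Int
  | _, [] => 1
  | _, [_] => 1
  | p, x :: y :: rest => fSpec x (y :: rest) + (if y - p ≤ 3 then fSpec p (y :: rest) else 0)

def gvals : List Int → List Int
  | [] => []
  | x :: r => fSpec x r :: gvals r

theorem getElemEq {xs ys : List Int} {i j : Nat} (hi : i < xs.length) (hj : j < ys.length)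
    (h : xs[i]? = ys[j]?) : xs[i] = ys[j] := by
  rw [List.getElem?_eq_getElem hi, List.getElem?_eq_getElem hj] at h
  exact Option.some.inj h

theorem bInner_key (xi : Int) (y : Int) (rest : List Int) :
    fSpec xi (y :: rest) = fSpec y rest + bInner xi rest (gvals rest) := by
  induction rest generalizing y with
  | nil => simp [fSpec, bInner]
  | cons z rest' ih =>
    simp only [fSpec, gvals, bInner]
    rw [ih z]
    by_cases h : z - xi > 3
    · rw [if_neg (by omega : ¬ z - xi ≤ 3), if_pos h]
    · rw [if_pos (by omega : z - xi ≤ 3), if_neg h]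

theorem bLoop_inv (rp : List Int) : ∀ (y : Int) (ys : List Int),
    bLoop rp (y :: ys) (gvals (y :: ys)) = gvals (rp.reverse ++ y :: ys) := by
  induction rp with
  | nil => intro y ys; simp [bLoop]
  | cons xi rp' ih =>
    intro y ys
    have h1 : ((gvals (y :: ys)).headD 0 + bInner xi (y :: ys).tail (gvals (y :: ys)).tail)
        = fSpec xi (y :: ys) := by
      simp only [gvals, List.headD, List.tail]
      exact (bInner_key xi y ys).symm
    simp only [bLoop, h1]
    have h2 : (fSpec xi (y :: ys) :: gvals (y :: ys)) = gvals (xi :: y :: ys) := rfl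
    rw [h2, ih xi (y :: ys)]
    simp

theorem bLoop_concat (zs : List Int) (z : Int) :
    (bLoop ((zs ++ [z]).take ((zs ++ [z]).length - 1)).reverse
       ((zs ++ [z]).drop ((zs ++ [z]).length - 1)) [1]).headD 0
    = (gvals (zs ++ [z])).headD 0 := by
  have hl : (zs ++ [z]).length - 1 = zs.length := by simp
  rw [hl, List.take_left, List.drop_left]
  have h1 : ([1] : List Int) = gvals [z] := by simp [gvals, fSpec]
  rw [h1, bLoop_inv zs.reverse z []]
  simp

theorem noWays_alt_eq (l : List Int) (idx : Int) (h0 : 0 ≤ idx)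
    (h2 : ¬ (l.length : Int) - 2 < idx) :
    noWays_alt l idx = fSpec (PySem.List.pyGetD l (idx-1) 0) (l.drop idx.toNat) := by
  simp only [noWays_alt]
  rw [if_neg h2, PySem.List.slice_from l h0]
  set p := PySem.List.pyGetD l (idx-1) 0 with hp
  obtain ⟨zs, z, hzz⟩ : ∃ zs z, p :: l.drop idx.toNat = zs ++ [z] := by
    rcases (List.eq_nil_or_concat (p :: l.drop idx.toNat)) with h | ⟨zs, z, h⟩
    · simp at h
    · exact ⟨zs, z, by simpa using h⟩
  rw [hzz, bLoop_concat zs z, ← hzz]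
  simp [gvals]

-- the recursive case always has at least two elements from idx on
theorem drop_two (l : List Int) (idx : Int) (h0 : 0 ≤ idx)
    (h2 : ¬ (l.length : Int) - 2 < idx) :
    ∃ x y rest, l.drop idx.toNat = x :: y :: rest := by
  have hlen : 2 ≤ (l.drop idx.toNat).length := by
    rw [List.length_drop]; omega
  match hd : l.drop idx.toNat with
  | [] => rw [hd] at hlen; simp at hlen
  | [x] => rw [hd] at hlen; simp at hlen
  | x :: y :: rest => exact ⟨x, y, rest, rfl⟩

theorem noWaysFuel_eq (fuel : Nat) : ∀ (l : List Int) (idx : Int), 0 ≤ idx →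
    (l.length : Int) - idx < fuel → 0 < fuel →
    noWaysFuel fuel l idx =
      if (l.length : Int) - 2 < idx then 1
      else fSpec (PySem.List.pyGetD l (idx-1) 0) (l.drop idx.toNat) := by
  induction fuel with
  | zero => intro l idx h0 hf hposf; exact absurd hposf (lt_irrefl 0)
  | succ fuel ih =>
    intro l idx h0 hf hposf
    by_cases hstop : (l.length : Int) - 2 < idx
    · simp [noWaysFuel, hstop]
    · rw [if_neg hstop]
      obtain ⟨x, y, rest, hd⟩ := drop_two l idx h0 hstop
      have hk2 : idx.toNat + 2 ≤ l.length := by omega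
      have hdlen : (l.drop idx.toNat).length = l.length - idx.toNat := List.length_drop ..
      have hx : PySem.List.pyGetD l idx 0 = x := by
        have hc : idx = ((idx.toNat : Nat) : Int) := by omega
        rw [hc, PySem.List.pyGetD_natCast, List.getD_eq_getElem?_getD]
        have h' : l[idx.toNat]? = (x :: y :: rest)[0]? := by
          rw [← hd, List.getElem?_drop, Nat.add_zero]
        rw [h']; rfl
      have hy : PySem.List.pyGetD l (idx+1) 0 = y := by
        have hc : idx + 1 = ((idx.toNat + 1 : Nat) : Int) := by omega
        rw [hc, PySem.List.pyGetD_natCast, List.getD_eq_getElem?_getD]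
        have h' : l[idx.toNat + 1]? = (x :: y :: rest)[1]? := by
          rw [← hd, List.getElem?_drop]
        rw [h']; rfl
      have hd1 : l.drop (idx.toNat + 1) = y :: rest := by
        have h' : l.drop (idx.toNat + 1) = (l.drop idx.toNat).tail := by
          rw [← List.drop_drop]; exact List.drop_one
        rw [h', hd]; rfl
      set p := PySem.List.pyGetD l (idx-1) 0 with hp
      -- the keep-branch recursive call
      have hkeep : noWaysFuel fuel l (idx+1) = fSpec x (y :: rest) := by
        rw [ih l (idx+1) (by omega) (by omega) (by omega)]
        by_cases hs : (l.length : Int) - 2 < idx + 1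
        · have hr : rest = [] := by
            rw [hd] at hdlen; simp at hdlen
            exact List.eq_nil_of_length_eq_zero (by omega)
          rw [if_pos hs, hr]; rfl
        · rw [if_neg hs]
          have he : idx + 1 - 1 = idx := by ring
          have ht : (idx + 1).toNat = idx.toNat + 1 := by omega
          rw [he, hx, ht, hd1]
      -- the delete-branch recursive call
      have hdel : noWaysFuel fuel
            (PySem.List.slice l none (some idx) ++ PySem.List.slice l (some (idx+1)) none) idx
          = fSpec p (y :: rest) := by
        rw [PySem.List.slice_to l h0, PySem.List.slice_from l (by omega : (0:Int) ≤ idx + 1)]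
        have ht : (idx + 1).toNat = idx.toNat + 1 := by omega
        rw [ht]
        set l2 := l.take idx.toNat ++ l.drop (idx.toNat + 1) with hl2
        have htlen : (l.take idx.toNat).length = idx.toNat := by
          rw [List.length_take]; omega
        have hlen2 : l2.length = l.length - 1 := by
          rw [hl2, List.length_append, htlen, List.length_drop]; omega
        have hdrop2 : l2.drop idx.toNat = y :: rest := by
          rw [hl2, List.drop_left' htlen, hd1]
        rw [ih l2 idx h0 (by omega) (by omega)]
        by_cases hs : (l2.length : Int) - 2 < idx
        · have hr : rest = [] := by
            rw [hd] at hdlen; simp at hdlen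
            exact List.eq_nil_of_length_eq_zero (by omega)
          rw [if_pos hs, hr]; rfl
        · rw [if_neg hs, hdrop2]
          have hpeq : PySem.List.pyGetD l2 (idx-1) 0 = p := by
            by_cases h1 : 1 ≤ idx
            · have hp1 : idx - 1 = ((idx.toNat - 1 : Nat) : Int) := by omega
              rw [hp, hp1, PySem.List.pyGetD_natCast, PySem.List.pyGetD_natCast,
                List.getD_eq_getElem?_getD, List.getD_eq_getElem?_getD]
              congr 1
              rw [hl2, List.getElem?_append_left (by rw [htlen]; omega),
                List.getElem?_take, if_pos (by omega)]
            · have hidx0 : idx = 0 := by omega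
              subst hidx0
              have hlen3 : 3 ≤ l.length := by omega
              have hl2t : l2 = l.tail := by
                rw [hl2]; simp [List.drop_one]
              rw [hp]
              have hm1 : (0:Int) - 1 = -1 := by norm_num
              rw [hm1, PySem.List.pyGetD_neg_ofNat l2 1 0 (by omega) (by omega),
                PySem.List.pyGetD_neg_ofNat l 1 0 (by omega) (by omega)]
              refine getElemEq (by omega) (by omega) ?_
              rw [hl2t, List.getElem?_tail]
              congr 1
              simp only [List.length_tail]
              omega
          rw [hpeq]
      conv_lhs => rw [noWaysFuel]
      rw [if_neg hstop, hy, ← hp, hd]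
      by_cases hgt : y - p > 3
      · rw [if_pos hgt, hkeep]
        simp only [fSpec]
        rw [if_neg (by omega : ¬ y - p ≤ 3)]
        ring
      · rw [if_neg hgt, hkeep, hdel]
        simp only [fSpec]
        rw [if_pos (by omega : y - p ≤ 3)]

-- ===== VERDICT (by name: the statement is the Claim_ definition above) =====
theorem noWays_spec : Claim_equal_noWays := by
  intro l idx _ hpre
  unfold Spec_noWays noWays
  by_cases hstop : (l.length : Int) - 2 < idx
  · have hA : noWaysFuel (l.length + 1 + 1) l idx = 1 := by
      rw [noWaysFuel, if_pos hstop]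
    have hB : noWays_alt l idx = 1 := by
      unfold noWays_alt; rw [if_pos hstop]
    rw [show l.length + 2 = l.length + 1 + 1 from rfl, hA, hB]
  · have h0 : 0 ≤ idx := by
      rcases hpre with h | h
      · exact h
      · exact absurd h hstop
    rw [noWaysFuel_eq (l.length + 2) l idx h0 (by push_cast; omega) (by omega), if_neg hstop,
      noWays_alt_eq l idx h0 hstop]
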